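-- pv_equiv track=rewrite | github.com/Thejshri-A/Python-1000 | 622. Air Quality Index.py | air_quality_index
-- ===== SOURCE A (Python) =====
-- def air_quality_index(aqi):
--     classify=[]
--     for val in aqi:
--         if val<50:
--             classify.append("Clean")
--         elif val<100:
--             classify.append("Moderate")
--         else:
--             classify.append("Not Clean")
--     return classify
-- ===== SOURCE B (Python) =====
-- def air_quality_index(aqi):
--     # Staged masking: start with the worst label everywhere, then refine in two passes.
--     labels = ["Not Clean"] * len(aqi)
--     labels = ["Moderate" if v < 100 else l for v, l in zip(aqi, labels)]
--     labels = ["Clean" if v < 50 else l for v, l in zip(aqi, labels)]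
--     return labels
-- ===== Notes on version B (the rewrite author's own statement) =====
-- stated objective: alternative
-- what changed: Replaced the single-pass if/elif/else cascade by staged masking: prefill every position with the worst label, then two refinement passes overwrite positions below each threshold, so no element is ever classified by a multi-way branch.
import Mathlib
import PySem

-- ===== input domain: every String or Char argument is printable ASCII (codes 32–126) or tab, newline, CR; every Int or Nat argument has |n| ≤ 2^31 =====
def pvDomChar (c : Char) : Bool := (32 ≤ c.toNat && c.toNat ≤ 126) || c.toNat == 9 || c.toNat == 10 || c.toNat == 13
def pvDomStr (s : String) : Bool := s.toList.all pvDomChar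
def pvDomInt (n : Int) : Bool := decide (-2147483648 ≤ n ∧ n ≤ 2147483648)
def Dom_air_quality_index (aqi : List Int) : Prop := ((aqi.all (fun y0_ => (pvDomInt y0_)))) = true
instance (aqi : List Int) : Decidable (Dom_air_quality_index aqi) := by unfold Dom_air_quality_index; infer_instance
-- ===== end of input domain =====

-- ===== PORT A =====
-- B replaces the single-pass if/elif cascade by staged masking passes that refine a prefilled label list (alternative).
def air_quality_index (aqi : List Int) : List String :=
  aqi.foldl (fun classify val =>
    if val < 50 then classify ++ ["Clean"]
    else if val < 100 then classify ++ ["Moderate"]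
    else classify ++ ["Not Clean"]) []

-- ===== PORT B =====
def air_quality_index_alt (aqi : List Int) : List String :=
  let labels0 : List String := List.replicate aqi.length "Not Clean"
  let labels1 : List String := (aqi.zip labels0).map (fun p => if p.1 < 100 then "Moderate" else p.2)
  (aqi.zip labels1).map (fun p => if p.1 < 50 then "Clean" else p.2)

-- ===== PRECONDITION & SPEC =====
def Spec_air_quality_index (aqi : List Int) (out : List String) : Prop := out = air_quality_index_alt aqi
instance (aqi : List Int) (out : List String) : Decidable (Spec_air_quality_index aqi out) := by unfold Spec_air_quality_index; infer_instance

-- ===== CLAIM (what is proved, stated in full; the proofs are below) =====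
def Claim_equal_air_quality_index : Prop := ∀ (aqi : List Int), Dom_air_quality_index aqi → Spec_air_quality_index aqi (air_quality_index aqi)

-- ===== LEMMAS AND PROOFS =====

def pvLabel (val : Int) : String :=
  if val < 50 then "Clean" else if val < 100 then "Moderate" else "Not Clean"

lemma portA_eq_map (aqi : List Int) (acc : List String) :
    aqi.foldl (fun classify val =>
      if val < 50 then classify ++ ["Clean"]
      else if val < 100 then classify ++ ["Moderate"]
      else classify ++ ["Not Clean"]) acc = acc ++ aqi.map pvLabel := by
  induction aqi generalizing acc with
  | nil => simp
  | cons x xs ih =>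
      simp only [List.foldl_cons, List.map_cons, pvLabel]
      split_ifs <;> simp [ih]

lemma portB_eq_map (aqi : List Int) : air_quality_index_alt aqi = aqi.map pvLabel := by
  induction aqi with
  | nil => rfl
  | cons x xs ih =>
      simp only [air_quality_index_alt, List.length_cons, List.replicate_succ,
        List.zip_cons_cons, List.map_cons] at *
      rw [ih]
      simp only [pvLabel]

-- ===== VERDICT (by name: the statement is the Claim_ definition above) =====
theorem air_quality_index_spec : Claim_equal_air_quality_index := by
  intro aqi _
  unfold Spec_air_quality_index air_quality_index
  rw [portA_eq_map, portB_eq_map]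
  simp
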